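-- pv_equiv track=rewrite | github.com/dongjangoon/CodeTest | programmers/kakao/2022_tech_internship/mbti.py | solution
-- ===== SOURCE A (Python) =====
-- def solution(survey, choices):
--     answer = ''
--     ch = {'R': 0, 'T': 0, 'C': 0, 'F': 0, 'J': 0, 'M': 0, 'A': 0, 'N': 0}
--
--     # 비동의, 동의
--     # 1: 매우 비동의, 7: 매우 동의
--     for s, c in zip(survey, choices):
--         if c > 4: ch[s[1]] += c-4
--         elif c < 4: ch[s[0]] += 4-c
--
--     li = list(ch.items())
--
--     for i in range(0, 8, 2):
--         if li[i][1] >= li[i+1][1]: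
--             answer += li[i][0]
--         else:
--             answer += li[i+1][0]
--
--     return answer
-- ===== SOURCE B (Python) =====
-- def solution(survey, choices):
--     # No running state at all: the score of each letter is a pure filtered sum
--     # over the whole survey, and each output letter is chosen by comparing two
--     # such sums (ties -> first letter, matching A's >=).
--     def score(letter):
--         return sum(c - 4 for s, c in zip(survey, choices) if c > 4 and s[1] == letter) \
--              + sum(4 - c for s, c in zip(survey, choices) if c < 4 and s[0] == letter)
--     return ''.join(a if score(a) >= score(b) else b for a, b in ('RT', 'CF', 'JM', 'AN'))
-- ===== Notes on version B (the rewrite author's own statement) =====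
-- stated objective: simpler
-- what changed: B drops A's mutable 8-counter dict and its single stateful pass plus list(ch.items()) pairwise read-back: each letter's score is computed independently as a pure filtered sum over the survey, and the answer is joined by comparing the two sums of each axis (ties give the first letter, matching A's >=).
import Mathlib
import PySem

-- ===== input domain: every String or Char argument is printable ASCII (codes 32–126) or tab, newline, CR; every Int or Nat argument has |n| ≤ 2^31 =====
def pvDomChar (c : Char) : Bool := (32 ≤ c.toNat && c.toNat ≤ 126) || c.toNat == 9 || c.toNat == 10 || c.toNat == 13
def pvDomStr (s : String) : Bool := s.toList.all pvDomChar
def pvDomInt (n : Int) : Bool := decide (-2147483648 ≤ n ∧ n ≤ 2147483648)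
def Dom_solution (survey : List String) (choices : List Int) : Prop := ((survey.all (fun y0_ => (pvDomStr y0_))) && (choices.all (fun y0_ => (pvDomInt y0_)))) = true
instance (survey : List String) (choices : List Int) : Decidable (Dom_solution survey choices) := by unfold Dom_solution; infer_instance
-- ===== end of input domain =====

-- B replaces A's mutable 8-counter dict pass by independent pure filtered sums per letter (objective: simpler).

-- ===== PORT A =====
-- ch[s[1]] += c-4 : Python raises KeyError when the letter is not a key; the
-- 'contains' guard makes the port total there (those inputs are outside Pre_).
def pvStepA (d : PySem.Dict Char Int) (p : String × Int) : PySem.Dict Char Int :=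
  if p.2 > 4 then
    match PySem.Str.pyGet? p.1 1 with        -- s[1]; none = IndexError, outside Pre_
    | some k => if PySem.Dict.contains d k then PySem.Dict.modify d k 0 (· + (p.2 - 4)) else d
    | none => d
  else if p.2 < 4 then
    match PySem.Str.pyGet? p.1 0 with        -- s[0]
    | some k => if PySem.Dict.contains d k then PySem.Dict.modify d k 0 (· + (4 - p.2)) else d
    | none => d
  else d

def solution (survey : List String) (choices : List Int) : String :=
  let ch : PySem.Dict Char Int :=
    PySem.Dict.ofList [('R',0),('T',0),('C',0),('F',0),('J',0),('M',0),('A',0),('N',0)]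
  let ch := (survey.zip choices).foldl pvStepA ch
  let li := PySem.Dict.items ch
  (PySem.List.pyRange 0 8 2).foldl (fun answer i =>
    match PySem.List.pyGet? li i, PySem.List.pyGet? li (i+1) with
    | some a, some b =>
        answer ++ (if a.2 ≥ b.2 then String.ofList [a.1] else String.ofList [b.1])
    | _, _ => answer) ""                      -- indices 0..7 always in range (8 keys)

-- ===== PORT B =====
-- Source B's score(letter): two generator sums over zip(survey, choices); the
-- short-circuit 'c > 4 and s[1] == letter' means s[1] is only read when c > 4
-- (a missing index raises there in Python — outside Pre_; pyGet? = none here).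
def pvScore (l : List (String × Int)) (letter : Char) : Int :=
  ((l.filter (fun p => decide (p.2 > 4) && (PySem.Str.pyGet? p.1 1 == some letter))).map
      (fun p => p.2 - 4)).sum
  + ((l.filter (fun p => decide (p.2 < 4) && (PySem.Str.pyGet? p.1 0 == some letter))).map
      (fun p => 4 - p.2)).sum

def solution_alt (survey : List String) (choices : List Int) : String :=
  PySem.Str.join "" ([('R','T'),('C','F'),('J','M'),('A','N')].map (fun pr =>
    if pvScore (survey.zip choices) pr.1 ≥ pvScore (survey.zip choices) pr.2
    then String.ofList [pr.1] else String.ofList [pr.2]))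

-- ===== PRECONDITION & SPEC =====
def pvLetters : List Char := ['R','T','C','F','J','M','A','N']

-- Pre_ excludes exactly the inputs where Python A raises: a survey entry paired with a
-- choice ≠ 4 whose indexed character is missing (IndexError) or not one of the eight
-- MBTI letters (KeyError).
def Pre_solution (survey : List String) (choices : List Int) : Prop :=
  ∀ p ∈ survey.zip choices,
    (p.2 > 4 → (PySem.Str.pyGet? p.1 1).any (fun k => pvLetters.contains k) = true) ∧
    (p.2 < 4 → (PySem.Str.pyGet? p.1 0).any (fun k => pvLetters.contains k) = true)
instance (survey : List String) (choices : List Int) : Decidable (Pre_solution survey choices) := by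
  unfold Pre_solution; infer_instance

def pvWitness_solution : List String × List Int := (["RT", "TR", "CF", "NA"], [7, 1, 4, 5])

def Spec_solution (survey : List String) (choices : List Int) (out : String) : Prop := out = solution_alt survey choices
instance (survey : List String) (choices : List Int) (out : String) : Decidable (Spec_solution survey choices out) := by unfold Spec_solution; infer_instance

-- ===== CLAIM (what is proved, stated in full; the proofs are below) =====
def Claim_equal_solution : Prop := ∀ (survey : List String) (choices : List Int), Dom_solution survey choices → Pre_solution survey choices → Spec_solution survey choices (solution survey choices)

-- ===== LEMMAS AND PROOFS =====

-- A's dict state: the eight keys never change, only the eight counters.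
def pvDA (r t c f j m a n : Int) : PySem.Dict Char Int :=
  ⟨[('R',r),('T',t),('C',c),('F',f),('J',j),('M',m),('A',a),('N',n)]⟩

-- one entry's contribution to letter k's score
def pvDelta (p : String × Int) (k : Char) : Int :=
  (if p.2 > 4 ∧ PySem.Str.pyGet? p.1 1 = some k then p.2 - 4 else 0)
  + (if p.2 < 4 ∧ PySem.Str.pyGet? p.1 0 = some k then 4 - p.2 else 0)

theorem pvScore_cons (p : String × Int) (l : List (String × Int)) (k : Char) :
    pvScore (p :: l) k = pvDelta p k + pvScore l k := by
  simp only [pvScore, pvDelta, List.filter_cons, Bool.and_eq_true, decide_eq_true_eq,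
    beq_iff_eq]
  split_ifs <;> simp_all [List.map_cons, List.sum_cons] <;> ring

theorem pvModA (r t c f j m a n amt : Int) (k : Char) :
    (if PySem.Dict.contains (pvDA r t c f j m a n) k
      then PySem.Dict.modify (pvDA r t c f j m a n) k 0 (· + amt)
      else pvDA r t c f j m a n) =
    pvDA (if k = 'R' then r + amt else r) (if k = 'T' then t + amt else t)
         (if k = 'C' then c + amt else c) (if k = 'F' then f + amt else f)
         (if k = 'J' then j + amt else j) (if k = 'M' then m + amt else m)
         (if k = 'A' then a + amt else a) (if k = 'N' then n + amt else n) := by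
  by_cases hR : k = 'R'; · subst hR; simp [pvDA, PySem.Dict.contains, PySem.Dict.modify, PySem.Dict.insert, PySem.Dict.getD, PySem.Dict.get?]
  by_cases hT : k = 'T'; · subst hT; simp [pvDA, PySem.Dict.contains, PySem.Dict.modify, PySem.Dict.insert, PySem.Dict.getD, PySem.Dict.get?]
  by_cases hC : k = 'C'; · subst hC; simp [pvDA, PySem.Dict.contains, PySem.Dict.modify, PySem.Dict.insert, PySem.Dict.getD, PySem.Dict.get?]
  by_cases hF : k = 'F'; · subst hF; simp [pvDA, PySem.Dict.contains, PySem.Dict.modify, PySem.Dict.insert, PySem.Dict.getD, PySem.Dict.get?]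
  by_cases hJ : k = 'J'; · subst hJ; simp [pvDA, PySem.Dict.contains, PySem.Dict.modify, PySem.Dict.insert, PySem.Dict.getD, PySem.Dict.get?]
  by_cases hM : k = 'M'; · subst hM; simp [pvDA, PySem.Dict.contains, PySem.Dict.modify, PySem.Dict.insert, PySem.Dict.getD, PySem.Dict.get?]
  by_cases hA : k = 'A'; · subst hA; simp [pvDA, PySem.Dict.contains, PySem.Dict.modify, PySem.Dict.insert, PySem.Dict.getD, PySem.Dict.get?]
  by_cases hN : k = 'N'; · subst hN; simp [pvDA, PySem.Dict.contains, PySem.Dict.modify, PySem.Dict.insert, PySem.Dict.getD, PySem.Dict.get?]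
  have hcon : PySem.Dict.contains (pvDA r t c f j m a n) k = false := by
    simp only [pvDA, PySem.Dict.contains, List.any_cons, List.any_nil, Bool.or_false,
      Bool.or_eq_false_iff, beq_eq_false_iff_ne, ne_eq]
    exact ⟨fun h => hR h.symm, fun h => hT h.symm, fun h => hC h.symm, fun h => hF h.symm,
      fun h => hJ h.symm, fun h => hM h.symm, fun h => hA h.symm, fun h => hN h.symm⟩
  simp [hcon, hR, hT, hC, hF, hJ, hM, hA, hN]

theorem pvStepA_delta (r t c f j m a n : Int) (p : String × Int) :
    pvStepA (pvDA r t c f j m a n) p =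
    pvDA (r + pvDelta p 'R') (t + pvDelta p 'T') (c + pvDelta p 'C') (f + pvDelta p 'F')
         (j + pvDelta p 'J') (m + pvDelta p 'M') (a + pvDelta p 'A') (n + pvDelta p 'N') := by
  obtain ⟨s, ci⟩ := p
  by_cases h4 : ci > 4
  · cases hg : PySem.List.pyGet? s.toList 1 with
    | none =>
      simp [pvStepA, pvDelta, PySem.Str.pyGet?, h4, hg, show ¬ ci < 4 by omega]
    | some k =>
      simp only [pvStepA, PySem.Str.pyGet?, PySem.Chars.pyGet?, if_pos h4, hg]
      rw [pvModA r t c f j m a n (ci - 4) k]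
      simp only [pvDelta, h4, true_and, show ¬ ci < 4 by omega, false_and, if_false,
        add_zero, pvDA, PySem.Dict.mk.injEq, List.cons.injEq,
        Prod.mk.injEq, true_and, and_true]
      refine ⟨?_, ?_, ?_, ?_, ?_, ?_, ?_, ?_⟩ <;> split_ifs <;> simp_all
  · by_cases hlt : ci < 4
    · cases hg : PySem.List.pyGet? s.toList 0 with
      | none =>
        simp [pvStepA, pvDelta, PySem.Str.pyGet?, h4, hlt, hg]
      | some k =>
        simp only [pvStepA, PySem.Str.pyGet?, PySem.Chars.pyGet?, if_neg h4, if_pos hlt, hg]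
        rw [pvModA r t c f j m a n (4 - ci) k]
        simp only [pvDelta, hlt, true_and, h4, false_and, if_false,
          zero_add, pvDA, PySem.Dict.mk.injEq, List.cons.injEq,
          Prod.mk.injEq, true_and, and_true]
        refine ⟨?_, ?_, ?_, ?_, ?_, ?_, ?_, ?_⟩ <;> split_ifs <;> simp_all
    · simp [pvStepA, pvDelta, h4, hlt]

theorem pvLoopA (l : List (String × Int)) (r t c f j m a n : Int) :
    l.foldl pvStepA (pvDA r t c f j m a n) =
    pvDA (r + pvScore l 'R') (t + pvScore l 'T') (c + pvScore l 'C') (f + pvScore l 'F')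
         (j + pvScore l 'J') (m + pvScore l 'M') (a + pvScore l 'A') (n + pvScore l 'N') := by
  induction l generalizing r t c f j m a n with
  | nil => simp [pvScore]
  | cons p tl ih =>
    rw [List.foldl_cons, pvStepA_delta, ih]
    simp only [pvScore_cons, add_assoc]

-- A's read-out loop, abstracted over the final dict state.
def pvFinA (d : PySem.Dict Char Int) : String :=
  let li := PySem.Dict.items d
  (PySem.List.pyRange 0 8 2).foldl (fun answer i =>
    match PySem.List.pyGet? li i, PySem.List.pyGet? li (i+1) with
    | some a, some b =>
        answer ++ (if a.2 ≥ b.2 then String.ofList [a.1] else String.ofList [b.1])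
    | _, _ => answer) ""

theorem pvFin_gen (r t c f j m a n : Int) :
    pvFinA (pvDA r t c f j m a n) =
    PySem.Str.join "" [(if r ≥ t then String.ofList ['R'] else String.ofList ['T']),
                       (if c ≥ f then String.ofList ['C'] else String.ofList ['F']),
                       (if j ≥ m then String.ofList ['J'] else String.ofList ['M']),
                       (if a ≥ n then String.ofList ['A'] else String.ofList ['N'])] := by
  have hrange : PySem.List.pyRange 0 8 2 = [0, 2, 4, 6] := by decide
  have a0 : PySem.List.pyGet? (PySem.Dict.items (pvDA r t c f j m a n)) 0 = some ('R', r) := rfl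
  have a1 : PySem.List.pyGet? (PySem.Dict.items (pvDA r t c f j m a n)) (0+1) = some ('T', t) := rfl
  have a2 : PySem.List.pyGet? (PySem.Dict.items (pvDA r t c f j m a n)) 2 = some ('C', c) := rfl
  have a3 : PySem.List.pyGet? (PySem.Dict.items (pvDA r t c f j m a n)) (2+1) = some ('F', f) := rfl
  have a4 : PySem.List.pyGet? (PySem.Dict.items (pvDA r t c f j m a n)) 4 = some ('J', j) := rfl
  have a5 : PySem.List.pyGet? (PySem.Dict.items (pvDA r t c f j m a n)) (4+1) = some ('M', m) := rfl
  have a6 : PySem.List.pyGet? (PySem.Dict.items (pvDA r t c f j m a n)) 6 = some ('A', a) := rfl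
  have a7 : PySem.List.pyGet? (PySem.Dict.items (pvDA r t c f j m a n)) (6+1) = some ('N', n) := rfl
  simp only [pvFinA, hrange, List.foldl, a0, a1, a2, a3, a4, a5, a6, a7]
  split_ifs <;> rfl

-- ===== VERDICT (by name: the statement is the Claim_ definition above) =====
theorem solution_spec : Claim_equal_solution := by
  intro survey choices _ _
  unfold Spec_solution
  have h1 : solution survey choices
      = pvFinA ((survey.zip choices).foldl pvStepA (pvDA 0 0 0 0 0 0 0 0)) := rfl
  rw [h1, pvLoopA, pvFin_gen]
  simp only [solution_alt, List.map, zero_add]
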